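-- pv_equiv track=rewrite | github.com/piMateusz/Chess_Game | figures.py | get_valid_pos_cross
-- ===== SOURCE A (Python) =====
-- rows = 8
--
-- cols = 8
--
-- def sorting(position_list, x, y):
--     new_list = []
--     for pos in position_list:
--         new_pos = pos[:]
--         pos_x, pos_y = pos[0], pos[1]
--         x_distance = abs(x - pos_x)
--         y_distance = abs(y - pos_y)
--         new_pos.append(x_distance + y_distance)
--         new_list.append(new_pos)
--     new_list = sorted(new_list, key=lambda element: element[2])
--     for pos in new_list:
--         pos.pop(2)
--     return new_list
--
-- def get_valid_pos_cross(x, y):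
--     val_positions = {'right-up': [], 'right-down': [], 'left-up': [], 'left-down': []}
--     for j in range(-7, 8):
--         if j:
--             if 0 <= x + j < cols:
--                 if 0 <= y + j < rows:
--                     if j > 0:
--                         val_positions['right-down'].append([x + j, y + j])
--                     else:
--                         val_positions['left-up'].append([x + j, y + j])
--             if 0 <= x + j < cols:
--                 if 0 <= y - j < rows:
--                     if j > 0:
--                         val_positions['right-up'].append([x + j, y - j])
--                     else:
--                         val_positions['left-down'].append([x + j, y - j])
--
--     # sorting
--     for key in val_positions:
--         val_positions[key] = sorting(val_positions[key], x, y)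
--
--     return val_positions
-- ===== SOURCE B (Python) =====
-- rows = 8
--
-- cols = 8
--
-- def get_valid_pos_cross(x, y):
--     # Each diagonal's valid squares form one contiguous run of steps d; compute
--     # its closed-form bounds and emit the run nearest-first, no sort needed.
--     def ray(lo, hi, f):
--         return [f(d) for d in range(lo, hi + 1)]
--     return {
--         'right-up': ray(max(1, -x, y - (rows - 1)), min(cols - 1, (cols - 1) - x, y),
--                         lambda d: [x + d, y - d]),
--         'right-down': ray(max(1, -x, -y), min(cols - 1, (cols - 1) - x, (rows - 1) - y),
--                           lambda d: [x + d, y + d]),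
--         'left-up': ray(max(1, x - (cols - 1), y - (rows - 1)), min(cols - 1, x, y),
--                        lambda d: [x - d, y - d]),
--         'left-down': ray(max(1, x - (cols - 1), -y), min(cols - 1, x, (rows - 1) - y),
--                          lambda d: [x - d, y + d]),
--     }
-- ===== Notes on version B (the rewrite author's own statement) =====
-- stated objective: simpler
-- what changed: Replaces the 15-step j-scan with conditional appends plus a per-key distance-annotation sort by a closed-form per-diagonal step interval emitted nearest-first, so the sorting helper and distance bookkeeping disappear.
import Mathlib
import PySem

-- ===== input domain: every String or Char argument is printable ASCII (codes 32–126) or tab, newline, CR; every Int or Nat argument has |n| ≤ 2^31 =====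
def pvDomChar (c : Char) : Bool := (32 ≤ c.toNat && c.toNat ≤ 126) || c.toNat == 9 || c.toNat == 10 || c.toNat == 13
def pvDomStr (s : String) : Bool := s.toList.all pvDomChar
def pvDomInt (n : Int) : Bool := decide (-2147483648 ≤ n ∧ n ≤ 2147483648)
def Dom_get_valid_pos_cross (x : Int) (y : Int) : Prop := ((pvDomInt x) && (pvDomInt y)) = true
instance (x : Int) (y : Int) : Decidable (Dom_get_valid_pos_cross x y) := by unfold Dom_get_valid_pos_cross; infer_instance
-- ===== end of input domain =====

-- B replaces A's 15-step scan + distance-annotation sort with a closed-form contiguous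
-- run of steps per diagonal, emitted nearest-first (objective: simpler).

-- ===== PORT A =====
-- port of helper 'sorting' (pos[0]/pos[1]/pop(2) never raise at A's call sites — every pos has length ≥ 3 there; .getD 0 / .getD pos is dead)
def sortingPort (position_list : List (List Int)) (x : Int) (y : Int) : List (List Int) :=
  let new_list := position_list.foldl (fun acc pos =>
    let new_pos := PySem.List.slice pos none none
    let pos_x := (PySem.List.pyGet? pos 0).getD 0
    let pos_y := (PySem.List.pyGet? pos 1).getD 0
    let x_distance := |x - pos_x|
    let y_distance := |y - pos_y|
    acc ++ [new_pos ++ [x_distance + y_distance]]) []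
  let new_list := PySem.List.sorted new_list (fun e => (PySem.List.pyGet? e 2).getD 0) false
  new_list.foldl (fun acc pos => acc ++ [((PySem.List.pop? pos 2).map (·.2)).getD pos]) []

def gvStep (x : Int) (y : Int) (d : PySem.Dict String (List (List Int))) (j : Int) :
    PySem.Dict String (List (List Int)) :=
  if j ≠ 0 then
    let d :=
      if 0 ≤ x + j ∧ x + j < 8 then
        if 0 ≤ y + j ∧ y + j < 8 then
          if j > 0 then d.modify "right-down" [] (· ++ [[x + j, y + j]])
          else d.modify "left-up" [] (· ++ [[x + j, y + j]])
        else d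
      else d
    if 0 ≤ x + j ∧ x + j < 8 then
      if 0 ≤ y - j ∧ y - j < 8 then
        if j > 0 then d.modify "right-up" [] (· ++ [[x + j, y - j]])
        else d.modify "left-down" [] (· ++ [[x + j, y - j]])
      else d
    else d
  else d

def gvInit : PySem.Dict String (List (List Int)) :=
  PySem.Dict.ofList [("right-up", []), ("right-down", []), ("left-up", []), ("left-down", [])]

-- the 'sorting' pass: for key in val_positions: val_positions[key] = sorting(val_positions[key], x, y)
def gvSortPass (x : Int) (y : Int) (d : PySem.Dict String (List (List Int))) :
    PySem.Dict String (List (List Int)) :=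
  d.keys.foldl (fun d' k => d'.modify k [] (fun v => sortingPort v x y)) d

def get_valid_pos_cross (x : Int) (y : Int) : List (String × List (List Int)) :=
  (gvSortPass x y ((PySem.List.pyRange (-7) 8 1).foldl (gvStep x y) gvInit)).items

-- ===== PORT B =====
def rayB (lo : Int) (hi : Int) (f : Int → List Int) : List (List Int) :=
  (PySem.List.pyRange lo (hi + 1) 1).map f

def get_valid_pos_cross_alt (x : Int) (y : Int) : List (String × List (List Int)) :=
  [("right-up",   rayB (max 1 (max (-x) (y - 7))) (min 7 (min (7 - x) y)) (fun d => [x + d, y - d])),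
   ("right-down", rayB (max 1 (max (-x) (-y)))    (min 7 (min (7 - x) (7 - y))) (fun d => [x + d, y + d])),
   ("left-up",    rayB (max 1 (max (x - 7) (y - 7))) (min 7 (min x y)) (fun d => [x - d, y - d])),
   ("left-down",  rayB (max 1 (max (x - 7) (-y))) (min 7 (min x (7 - y))) (fun d => [x - d, y + d]))]

-- ===== PRECONDITION & SPEC =====
def Spec_get_valid_pos_cross (x : Int) (y : Int) (out : List (String × List (List Int))) : Prop := out = get_valid_pos_cross_alt x y
instance (x : Int) (y : Int) (out : List (String × List (List Int))) : Decidable (Spec_get_valid_pos_cross x y out) := by unfold Spec_get_valid_pos_cross; infer_instance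

-- ===== CLAIM (what is proved, stated in full; the proofs are below) =====
def Claim_equal_get_valid_pos_cross : Prop := ∀ (x : Int) (y : Int), Dom_get_valid_pos_cross x y → Spec_get_valid_pos_cross x y (get_valid_pos_cross x y)

-- ===== LEMMAS AND PROOFS =====

def pvEmpty4 : List (String × List (List Int)) :=
  [("right-up", []), ("right-down", []), ("left-up", []), ("left-down", [])]

def pvFar (x y : Int) : Prop := x ≤ -8 ∨ 15 ≤ x ∨ y ≤ -8 ∨ 15 ≤ y

theorem gvStep_id (x y : Int) (h : pvFar x y) (d : PySem.Dict String (List (List Int)))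
    (j : Int) (hj1 : -7 ≤ j) (hj2 : j < 8) : gvStep x y d j = d := by
  unfold gvStep pvFar at *
  split_ifs <;> first | rfl | omega

theorem foldl_id {α β : Type} (l : List α) (f : β → α → β)
    (h : ∀ a ∈ l, ∀ b, f b a = b) (b : β) : l.foldl f b = b := by
  induction l generalizing b with
  | nil => rfl
  | cons a t ih =>
      simp only [List.foldl_cons, h a (by simp) b]
      exact ih (fun j hj b => h j (by simp [hj]) b) b

theorem foldl_gvStep_id (x y : Int) (h : pvFar x y) (d : PySem.Dict String (List (List Int))) :
    (PySem.List.pyRange (-7) 8 1).foldl (gvStep x y) d = d := by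
  refine foldl_id _ _ (fun j hj d => ?_) d
  rw [PySem.List.mem_pyRange_one] at hj
  exact gvStep_id x y h d j hj.1 hj.2

theorem a_far (x y : Int) (h : pvFar x y) : get_valid_pos_cross x y = pvEmpty4 := by
  unfold get_valid_pos_cross
  rw [foldl_gvStep_id x y h]
  rfl

theorem b_far (x y : Int) (h : pvFar x y) : get_valid_pos_cross_alt x y = pvEmpty4 := by
  unfold get_valid_pos_cross_alt rayB pvEmpty4 pvFar at *
  rw [PySem.List.pyRange_one_eq_nil (by omega), PySem.List.pyRange_one_eq_nil (by omega),
      PySem.List.pyRange_one_eq_nil (by omega), PySem.List.pyRange_one_eq_nil (by omega)]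
  rfl

theorem near_eq : ∀ a ∈ List.range 22, ∀ b ∈ List.range 22,
    get_valid_pos_cross ((a : Int) - 7) ((b : Int) - 7)
      = get_valid_pos_cross_alt ((a : Int) - 7) ((b : Int) - 7) := by decide

-- ===== VERDICT (by name: the statement is the Claim_ definition above) =====
theorem get_valid_pos_cross_spec : Claim_equal_get_valid_pos_cross := by
  intro x y _
  unfold Spec_get_valid_pos_cross
  by_cases h : pvFar x y
  · rw [a_far x y h, b_far x y h]
  · unfold pvFar at h
    have hx : (x + 7).toNat ∈ List.range 22 := by
      rw [List.mem_range]; omega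
    have hy : (y + 7).toNat ∈ List.range 22 := by
      rw [List.mem_range]; omega
    have := near_eq _ hx _ hy
    have ex : ((x + 7).toNat : Int) - 7 = x := by omega
    have ey : ((y + 7).toNat : Int) - 7 = y := by omega
    rwa [ex, ey] at this
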